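-- pv_equiv track=rewrite | github.com/barbs-pm/Log_Redo_DBMS | log.py | find_start
-- ===== SOURCE A (Python) =====
-- def find_start(lines):
--     start = 0
--     end = False
--     for idx, line in enumerate(lines):
--         if 'Start CKPT' in line:
--             start = idx
--         if 'End CKPT' in line:
--             end = True
--
--     return start, end
-- ===== SOURCE B (Python) =====
-- def find_start(lines):
--     start = 0
--     for i in range(len(lines) - 1, -1, -1):
--         if 'Start CKPT' in lines[i]:
--             start = i
--             break
--     end = any('End CKPT' in line for line in lines)
--     return start, end
-- ===== Notes on version B (the rewrite author's own statement) =====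
-- stated objective: alternative
-- what changed: Replaces the single interleaved forward loop with a reverse early-exit index scan for the last 'Start CKPT' plus a separate any() existence pass for 'End CKPT'.
import Mathlib
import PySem

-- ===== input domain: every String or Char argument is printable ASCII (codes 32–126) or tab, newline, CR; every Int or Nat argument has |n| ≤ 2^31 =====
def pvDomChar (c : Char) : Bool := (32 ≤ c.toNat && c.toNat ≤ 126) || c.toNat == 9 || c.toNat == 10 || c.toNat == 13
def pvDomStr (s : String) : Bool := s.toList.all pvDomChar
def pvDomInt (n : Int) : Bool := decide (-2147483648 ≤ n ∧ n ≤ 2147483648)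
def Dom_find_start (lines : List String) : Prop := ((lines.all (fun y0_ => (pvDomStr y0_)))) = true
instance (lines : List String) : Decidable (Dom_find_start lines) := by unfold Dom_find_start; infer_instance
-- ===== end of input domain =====

-- B replaces A's single interleaved forward loop by a reverse early-exit index scan for the
-- last 'Start CKPT' plus a separate existence pass for 'End CKPT' (alternative decomposition, same cost).
-- ===== PORT A =====
def find_start (lines : List String) : Int × Bool :=
  (PySem.List.enumerate lines 0).foldl
    (fun st p =>
      let st := if PySem.Str.isIn "Start CKPT" p.2 then (p.1, st.2) else st
      if PySem.Str.isIn "End CKPT" p.2 then (st.1, true) else st)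
    (0, false)

-- ===== PORT B =====
-- reverse scan with break: recursion over the countdown index list, returning on first hit
-- (lines[i] is always in range here, so pyGetD with a dummy default is exact)
def findStartRev (lines : List String) : List Int → Int
  | [] => 0
  | i :: rest =>
    if PySem.Str.isIn "Start CKPT" (PySem.List.pyGetD lines i "") then i
    else findStartRev lines rest

def find_start_alt (lines : List String) : Int × Bool :=
  (findStartRev lines (PySem.List.pyRange ((lines.length : Int) - 1) (-1) (-1)),
   lines.any (fun l => PySem.Str.isIn "End CKPT" l))

-- ===== PRECONDITION & SPEC =====
def Spec_find_start (lines : List String) (out : Int × Bool) : Prop := out = find_start_alt lines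
instance (lines : List String) (out : Int × Bool) : Decidable (Spec_find_start lines out) := by unfold Spec_find_start; infer_instance

-- ===== CLAIM (what is proved, stated in full; the proofs are below) =====
def Claim_equal_find_start : Prop := ∀ (lines : List String), Dom_find_start lines → Spec_find_start lines (find_start lines)

-- ===== LEMMAS AND PROOFS =====

-- ===== VERDICT (by name: the statement is the Claim_ definition above) =====
theorem findStartRev_congr (l1 l2 : List String) (idxs : List Int)
    (h : ∀ i ∈ idxs, PySem.List.pyGetD l1 i "" = PySem.List.pyGetD l2 i "") :
    findStartRev l1 idxs = findStartRev l2 idxs := by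
  induction idxs with
  | nil => rfl
  | cons i rest ih =>
    simp only [findStartRev, h i (List.mem_cons_self ..)]
    split
    · rfl
    · exact ih fun j hj => h j (List.mem_cons_of_mem _ hj)

theorem find_start_ab (lines : List String) : find_start lines = find_start_alt lines := by
  induction lines using List.reverseRecOn with
  | nil => decide
  | append_singleton l x ih =>
    have hA : find_start (l ++ [x]) =
        (let st := if PySem.Str.isIn "Start CKPT" x then ((l.length : Int), (find_start l).2)
                   else find_start l
         if PySem.Str.isIn "End CKPT" x then (st.1, true) else st) := by
      simp [find_start, PySem.List.enumerate_append, PySem.List.enumerate_cons,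
        List.foldl_append]
    have hrange : PySem.List.pyRange (((l ++ [x]).length : Int) - 1) (-1) (-1) =
        (l.length : Int) :: PySem.List.pyRange ((l.length : Int) - 1) (-1) (-1) := by
      have he : ((l ++ [x]).length : Int) - 1 = (l.length : Int) := by simp
      rw [he]
      exact PySem.List.pyRange_neg_one_cons (by omega)
    have hgetx : PySem.List.pyGetD (l ++ [x]) (l.length : Int) "" = x := by
      rw [PySem.List.pyGetD_eq_getElem (l ++ [x]) "" (by positivity)
        (by simp)]
      simp
    have hrest : findStartRev (l ++ [x]) (PySem.List.pyRange ((l.length : Int) - 1) (-1) (-1)) =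
        findStartRev l (PySem.List.pyRange ((l.length : Int) - 1) (-1) (-1)) := by
      apply findStartRev_congr
      intro i hi
      rw [PySem.List.mem_pyRange_neg_one] at hi
      have h0 : 0 ≤ i := by omega
      have h1 : i < (l.length : Int) := by omega
      rw [PySem.List.pyGetD_eq_getElem (l ++ [x]) "" h0 (by simp; omega),
          PySem.List.pyGetD_eq_getElem l "" h0 h1]
      rw [List.getElem_append_left (by omega)]
    have hB : find_start_alt (l ++ [x]) =
        ((if PySem.Str.isIn "Start CKPT" x then (l.length : Int) else (find_start_alt l).1),
         ((find_start_alt l).2 || PySem.Str.isIn "End CKPT" x)) := by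
      simp only [find_start_alt, hrange, findStartRev, hgetx, hrest, List.any_append,
        List.any_cons, List.any_nil, Bool.or_false]
    rw [hA, hB, ih]
    cases hs : PySem.Str.isIn "Start CKPT" x <;> cases he : PySem.Str.isIn "End CKPT" x <;>
      simp_all

theorem find_start_spec : Claim_equal_find_start := by
  intro lines _
  exact find_start_ab lines
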